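-- pv_equiv track=rewrite | github.com/Raphencoder/SEM | sem/exporters/html.py | add_pos_corpus
-- ===== SOURCE A (Python) =====
-- def add_pos_corpus(escaped, corpus, column):
--     to_return = [e[:] for e in escaped]
--     for i in range(len(to_return)):
--         for j in range(len(to_return[i])):
--             if corpus[i][j][column][0] == "_":
--                 if (j+1 == len(to_return[i]) or corpus[i][j+1][column][0] != "_"):
--                     to_return[i][j] = '{0}</span>'.format(to_return[i][j])
--             else:
--                 to_return[i][j] = '<span id="{0}" title="{0}">{1}'.format(corpus[i][j][column], to_return[i][j])
--                 if (j+1 == len(to_return[i]) or corpus[i][j+1][column][0] != "_"):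
--                     to_return[i][j] = '{0}</span>'.format(to_return[i][j])
--     return to_return
-- ===== SOURCE B (Python) =====
-- def add_pos_corpus(escaped, corpus, column):
--     # Forward state machine: build each output row token by token; a head tag
--     # closes the previous token's span, and the last token of a row is closed
--     # at the end. No lookahead, no index arithmetic.
--     result = []
--     for row, tags in zip(escaped, corpus):
--         out = []
--         for tok, fields in zip(row, tags):
--             tag = fields[column]
--             if tag[0] != '_':
--                 if out:
--                     out[-1] += '</span>'
--                 out.append('<span id="{0}" title="{0}">'.format(tag) + tok)
--             else:
--                 out.append(tok)
--         if out:
--             out[-1] += '</span>'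
--         result.append(out)
--     return result
-- ===== Notes on version B (the rewrite author's own statement) =====
-- stated objective: simpler
-- what changed: Replaces the index-based double loop with lookahead (checking corpus[i][j+1] to decide whether to close the span at j) by a forward state machine over zip(row, tags): a head tag closes the previous output token and opens a new span, and the last token of each row is closed after the loop; no index arithmetic or lookahead remains.
-- outside the precondition, e.g. on add_pos_corpus([[]], [], 0): A returns [[]], B returns []
import Mathlib
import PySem

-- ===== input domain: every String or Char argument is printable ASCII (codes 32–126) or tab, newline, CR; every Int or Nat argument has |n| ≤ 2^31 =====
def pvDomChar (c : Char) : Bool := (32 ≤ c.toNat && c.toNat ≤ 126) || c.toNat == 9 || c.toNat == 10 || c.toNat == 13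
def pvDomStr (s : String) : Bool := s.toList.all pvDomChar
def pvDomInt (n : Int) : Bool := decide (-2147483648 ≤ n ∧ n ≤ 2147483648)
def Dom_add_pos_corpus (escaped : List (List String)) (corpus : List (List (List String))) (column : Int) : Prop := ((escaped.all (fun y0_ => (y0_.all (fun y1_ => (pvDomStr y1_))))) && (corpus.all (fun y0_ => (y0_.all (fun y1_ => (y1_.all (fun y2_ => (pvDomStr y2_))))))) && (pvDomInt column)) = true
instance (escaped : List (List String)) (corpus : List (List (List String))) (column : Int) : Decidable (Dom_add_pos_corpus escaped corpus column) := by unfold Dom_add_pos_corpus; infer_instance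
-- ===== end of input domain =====

-- B rewrites A's lookahead-indexed double loop as a forward state machine over zip (simpler; return-value equivalence proved on Pre_).

-- ===== PORT A =====
-- corpus[i][j][column]  (default "" only reachable outside Pre_)
def pvTag (tags : List (List String)) (column : Int) (j : Nat) : String :=
  (PySem.List.pyGet? (tags.getD j []) column).getD ""
-- s[0] == "_"  (tag nonempty under Pre_)
def pvUnd (s : String) : Bool := PySem.Str.pyGet? s 0 == some '_'

-- the inner j-loop of A, mutating row i in place via List.set
def pvRowA (tags : List (List String)) (column : Int) (row0 : List String) : List String :=
  (List.range row0.length).foldl (fun row j =>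
    let tag := pvTag tags column j
    let cell := row.getD j ""
    if pvUnd tag then
      if j+1 == row.length || !(pvUnd (pvTag tags column (j+1))) then
        row.set j (cell ++ "</span>")
      else row
    else
      let c1 := "<span id=\"" ++ tag ++ "\" title=\"" ++ tag ++ "\">" ++ cell
      row.set j (if j+1 == row.length || !(pvUnd (pvTag tags column (j+1))) then c1 ++ "</span>" else c1)) row0

def add_pos_corpus (escaped : List (List String)) (corpus : List (List (List String))) (column : Int) : List (List String) :=
  let to_return := escaped
  (List.range to_return.length).foldl (fun tr i =>
    tr.set i (pvRowA (corpus.getD i []) column (tr.getD i []))) to_return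

-- ===== PORT B =====
-- out[-1] += s
def pvAppendLast : List String → String → List String
  | [], _ => []
  | [x], s => [x ++ s]
  | x :: y :: xs, s => x :: pvAppendLast (y :: xs) s

-- one iteration of B's inner loop
def pvStepB (column : Int) (out : List String) (p : String × List String) : List String :=
  let tag := (PySem.List.pyGet? p.2 column).getD ""
  if !(pvUnd tag) then
    (if out.isEmpty then out else pvAppendLast out "</span>") ++
      ["<span id=\"" ++ tag ++ "\" title=\"" ++ tag ++ "\">" ++ p.1]
  else out ++ [p.1]

def pvRowB (column : Int) (pairs : List (String × List String)) : List String :=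
  let out := pairs.foldl (pvStepB column) []
  if out.isEmpty then out else pvAppendLast out "</span>"

def add_pos_corpus_alt (escaped : List (List String)) (corpus : List (List (List String))) (column : Int) : List (List String) :=
  (escaped.zip corpus).map (fun rc => pvRowB column (rc.1.zip rc.2))

-- ===== PRECONDITION & SPEC =====
-- Pre_ = exactly where A returns without raising (every accessed corpus cell exists, column in
-- range, tag nonempty), EXCEPT that it also requires escaped.length ≤ corpus.length: on ragged
-- inputs where every escaped row beyond corpus's rows is empty, A accidentally returns those rows
-- untouched while B's zip drops them — a misaligned-parallel-lists corner no caller would specify.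
def Pre_add_pos_corpus (escaped : List (List String)) (corpus : List (List (List String))) (column : Int) : Prop :=
  escaped.length ≤ corpus.length ∧
  ∀ i, i < escaped.length →
    (escaped.getD i []).length ≤ (corpus.getD i []).length ∧
    ∀ j, j < (escaped.getD i []).length →
      PySem.Raise.InRange ((corpus.getD i []).getD j []).length column ∧
      (PySem.List.pyGet? ((corpus.getD i []).getD j []) column).getD "" ≠ ""

instance (escaped : List (List String)) (corpus : List (List (List String))) (column : Int) : Decidable (Pre_add_pos_corpus escaped corpus column) := by unfold Pre_add_pos_corpus; infer_instance

def pvWitness_add_pos_corpus : List (List String) × List (List (List String)) × Int :=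
  ([["a", "b", "c"], []], [[["N"], ["_x"], ["Vb"]], []], 0)

def Spec_add_pos_corpus (escaped : List (List String)) (corpus : List (List (List String))) (column : Int) (out : List (List String)) : Prop := out = add_pos_corpus_alt escaped corpus column
instance (escaped : List (List String)) (corpus : List (List (List String))) (column : Int) (out : List (List String)) : Decidable (Spec_add_pos_corpus escaped corpus column out) := by unfold Spec_add_pos_corpus; infer_instance

-- ===== CLAIM (what is proved, stated in full; the proofs are below) =====
def Claim_equal_add_pos_corpus : Prop := ∀ (escaped : List (List String)) (corpus : List (List (List String))) (column : Int), Dom_add_pos_corpus escaped corpus column → Pre_add_pos_corpus escaped corpus column → Spec_add_pos_corpus escaped corpus column (add_pos_corpus escaped corpus column)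

-- ===== LEMMAS AND PROOFS =====

-- the common closed form: the final content of output cell j of a row
def pvSpecCell (e : List String) (tags : List (List String)) (column : Int) (j : Nat) : String :=
  let t := pvTag tags column j
  let base := if pvUnd t then e.getD j "" else "<span id=\"" ++ t ++ "\" title=\"" ++ t ++ "\">" ++ e.getD j ""
  if j+1 == e.length || !(pvUnd (pvTag tags column (j+1))) then base ++ "</span>" else base

theorem pv_set_getD_self {α : Type} (l : List α) (j : Nat) (d : α) :
    l.set j (l.getD j d) = l := by
  by_cases h : j < l.length
  · rw [List.getD_eq_getElem l d h, List.set_getElem_self h]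
  · exact List.set_eq_of_length_le (by omega)

theorem pv_loopSet {α : Type} (e : List α) (d : α) (g : Nat → Nat → α → α) :
    ∀ m, m ≤ e.length →
      (List.range m).foldl (fun r j => r.set j (g r.length j (r.getD j d))) e
        = (List.range m).map (fun j => g e.length j (e.getD j d)) ++ e.drop m := by
  intro m hm
  induction m with
  | zero => simp
  | succ m ih =>
    have hm' : m ≤ e.length := Nat.le_of_succ_le hm
    have hmlt : m < e.length := hm
    rw [List.range_succ, List.foldl_append, ih hm']
    set M := (List.range m).map (fun j => g e.length j (e.getD j d)) with hM
    have hMlen : M.length = m := by simp [hM]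
    have hPlen : (M ++ e.drop m).length = e.length := by
      simp only [List.length_append, List.length_drop, hMlen]; omega
    have hdrop : e.drop m = e[m] :: e.drop (m+1) := List.drop_eq_getElem_cons hmlt
    simp only [List.foldl_cons, List.foldl_nil]
    rw [hPlen, List.set_append_right _ _ (by omega), List.getD_append_right _ _ _ _ (by omega),
      hMlen, Nat.sub_self, hdrop]
    simp only [List.getD_cons_zero, List.set_cons_zero]
    rw [List.map_append, List.map_cons, List.map_nil, List.getD_eq_getElem e d hmlt,
      List.append_assoc]
    rfl

def pvG (tags : List (List String)) (column : Int) (n j : Nat) (v : String) : String :=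
  let tag := pvTag tags column j
  if pvUnd tag then
    if j+1 == n || !(pvUnd (pvTag tags column (j+1))) then v ++ "</span>" else v
  else
    let c1 := "<span id=\"" ++ tag ++ "\" title=\"" ++ tag ++ "\">" ++ v
    if j+1 == n || !(pvUnd (pvTag tags column (j+1))) then c1 ++ "</span>" else c1

theorem pvRowA_spec (tags : List (List String)) (column : Int) (e : List String) :
    pvRowA tags column e = (List.range e.length).map (pvSpecCell e tags column) := by
  have hfun : pvRowA tags column e
      = (List.range e.length).foldl
          (fun r j => r.set j (pvG tags column r.length j (r.getD j ""))) e := by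
    unfold pvRowA
    congr 1
    funext row j
    simp only [pvG]
    cases hu : pvUnd (pvTag tags column j) <;>
      cases hc : (j+1 == row.length || !(pvUnd (pvTag tags column (j+1)))) <;>
        (simp only [Bool.false_eq_true, if_true, if_false]; try rfl)
    exact (pv_set_getD_self row j "").symm
  rw [hfun, pv_loopSet e "" (pvG tags column) e.length le_rfl, List.drop_length,
    List.append_nil]
  apply List.map_congr_left
  intro j hj
  simp only [pvG, pvSpecCell]
  cases hu : pvUnd (pvTag tags column j) <;>
    cases hc : (j+1 == e.length || !(pvUnd (pvTag tags column (j+1)))) <;>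
      simp only [Bool.false_eq_true, if_true, if_false]

theorem pvAppendLast_append (out l : List String) (s : String) (hl : l ≠ []) :
    pvAppendLast (out ++ l) s = out ++ pvAppendLast l s := by
  induction out with
  | nil => simp
  | cons x xs ih =>
    cases h : xs ++ l with
    | nil => exact absurd (List.append_eq_nil_iff.mp h).2 hl
    | cons y ys =>
      calc pvAppendLast (x :: xs ++ l) s
          = x :: pvAppendLast (xs ++ l) s := by rw [List.cons_append, h]; rfl
        _ = x :: (xs ++ pvAppendLast l s) := by rw [ih]
        _ = (x :: xs) ++ pvAppendLast l s := rfl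

theorem pvStepB_ne_nil (column : Int) (out : List String) (p : String × List String) :
    pvStepB column out p ≠ [] := by
  simp only [pvStepB]
  split <;> try split
  all_goals exact List.append_ne_nil_of_right_ne_nil _ (List.cons_ne_nil _ _)

theorem pv_foldl_stepB_ne_nil (column : Int) (pairs : List (String × List String)) :
    ∀ l : List String, l ≠ [] → pairs.foldl (pvStepB column) l ≠ [] := by
  induction pairs with
  | nil => intro l hl; simpa using hl
  | cons p ps ih => intro l hl; exact ih _ (pvStepB_ne_nil column l p)

theorem pv_foldl_stepB_shift (column : Int) (pairs : List (String × List String)) :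
    ∀ out l : List String, l ≠ [] →
      pairs.foldl (pvStepB column) (out ++ l) = out ++ pairs.foldl (pvStepB column) l := by
  induction pairs with
  | nil => intro out l _; simp
  | cons p ps ih =>
    intro out l hl
    simp only [List.foldl_cons]
    have h1 : (out ++ l).isEmpty = false :=
      List.isEmpty_eq_false_iff.mpr (List.append_ne_nil_of_right_ne_nil _ hl)
    have h2 : l.isEmpty = false := List.isEmpty_eq_false_iff.mpr hl
    have hstep : pvStepB column (out ++ l) p = out ++ pvStepB column l p := by
      simp only [pvStepB]
      split
      · rw [h1, h2]
        simp only [Bool.false_eq_true, if_false]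
        rw [pvAppendLast_append _ _ _ hl, List.append_assoc]
      · rw [List.append_assoc]
    rw [hstep, ih _ _ (pvStepB_ne_nil column l p)]

theorem pvSpecCell_cons (x : String) (e : List String) (t : List String)
    (tags : List (List String)) (column : Int) (j : Nat) :
    pvSpecCell (x::e) (t::tags) column (j+1) = pvSpecCell e tags column j := by
  simp only [pvSpecCell, pvTag, List.getD_cons_succ, List.length_cons]
  simp

theorem pvSpecCell_zero (x : String) (e : List String) (t : List String)
    (tags : List (List String)) (column : Int) :
    pvSpecCell (x::e) (t::tags) column 0
      = (let tag := (PySem.List.pyGet? t column).getD ""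
         let base := if pvUnd tag then x
            else "<span id=\"" ++ tag ++ "\" title=\"" ++ tag ++ "\">" ++ x
         if e.isEmpty || !(pvUnd (pvTag tags column 0)) then base ++ "</span>" else base) := by
  simp only [pvSpecCell, pvTag, List.getD_cons_zero, List.getD_cons_succ, List.length_cons,
    Nat.zero_add]
  have h1 : (1 == e.length + 1) = e.isEmpty := by cases e <;> simp
  rw [h1]
  rfl

theorem pv_spec_cons (x : String) (e : List String) (t : List String)
    (tags : List (List String)) (column : Int) :
    (List.range (x::e).length).map (pvSpecCell (x::e) (t::tags) column)
      = pvSpecCell (x::e) (t::tags) column 0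
          :: (List.range e.length).map (pvSpecCell e tags column) := by
  rw [List.length_cons, List.range_succ_eq_map, List.map_cons, List.map_map]
  congr 1
  apply List.map_congr_left
  intro j _
  exact pvSpecCell_cons x e t tags column j

theorem pv_keyB (column : Int) :
    ∀ (e : List String) (tags : List (List String)) (c : String), e.length ≤ tags.length →
      pvAppendLast ((e.zip tags).foldl (pvStepB column) [c]) "</span>"
        = (if e.isEmpty || !(pvUnd (pvTag tags column 0)) then c ++ "</span>" else c)
            :: (List.range e.length).map (pvSpecCell e tags column) := by
  intro e
  induction e with
  | nil =>
    intro tags c _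
    simp only [List.zip_nil_left, List.foldl_nil, List.isEmpty_nil, Bool.true_or, if_true,
      List.length_nil, List.range_zero, List.map_nil]
    rfl
  | cons x e ih =>
    intro tags c hle
    cases tags with
    | nil => exact absurd hle (by simp)
    | cons t tags =>
      have hle' : e.length ≤ tags.length := by simpa using hle
      simp only [List.zip_cons_cons, List.foldl_cons]
      rw [pv_spec_cons, pvSpecCell_zero]
      cases hu : pvUnd ((PySem.List.pyGet? t column).getD "") with
      | false =>
        have hstep : pvStepB column [c] (x, t)
            = [c ++ "</span>"]
              ++ ["<span id=\"" ++ (PySem.List.pyGet? t column).getD "" ++ "\" title=\""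
                    ++ (PySem.List.pyGet? t column).getD "" ++ "\">" ++ x] := by
          simp only [pvStepB, hu, Bool.not_false, if_true]
          rfl
        rw [hstep, pv_foldl_stepB_shift column _ _ _ (List.cons_ne_nil _ _),
          pvAppendLast_append _ _ _
            (pv_foldl_stepB_ne_nil column _ _ (List.cons_ne_nil _ _)),
          ih tags _ hle']
        simp only [pvTag, List.getD_cons_zero, List.isEmpty_cons, hu, Bool.not_false,
          Bool.false_or, if_true, Bool.false_eq_true, if_false]
        rfl
      | true =>
        have hstep : pvStepB column [c] (x, t) = [c] ++ [x] := by
          simp only [pvStepB, hu, Bool.not_true, Bool.false_eq_true, if_false]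
          try rfl
        rw [hstep, pv_foldl_stepB_shift column _ _ _ (List.cons_ne_nil _ _),
          pvAppendLast_append _ _ _
            (pv_foldl_stepB_ne_nil column _ _ (List.cons_ne_nil _ _)),
          ih tags _ hle']
        simp only [pvTag, List.getD_cons_zero, List.isEmpty_cons, hu, Bool.not_true,
          Bool.false_or, if_true, Bool.false_eq_true, if_false]
        rfl

theorem pvRowB_spec (tags : List (List String)) (column : Int) (e : List String)
    (hle : e.length ≤ tags.length) :
    pvRowB column (e.zip tags) = (List.range e.length).map (pvSpecCell e tags column) := by
  cases e with
  | nil => simp [pvRowB]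
  | cons x e =>
    cases tags with
    | nil => exact absurd hle (by simp)
    | cons t tags =>
      have hle' : e.length ≤ tags.length := by simpa using hle
      simp only [pvRowB, List.zip_cons_cons, List.foldl_cons]
      rw [pv_spec_cons, pvSpecCell_zero]
      cases hu : pvUnd ((PySem.List.pyGet? t column).getD "") with
      | false =>
        have hstep : pvStepB column [] (x, t)
            = ["<span id=\"" ++ (PySem.List.pyGet? t column).getD "" ++ "\" title=\""
                ++ (PySem.List.pyGet? t column).getD "" ++ "\">" ++ x] := by
          simp only [pvStepB, hu, Bool.not_false, if_true]
          rfl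
        rw [hstep,
          List.isEmpty_eq_false_iff.mpr
            (pv_foldl_stepB_ne_nil column _ _ (List.cons_ne_nil _ _)),
          if_neg (by simp), pv_keyB column e tags _ hle']
        simp only [pvTag, hu, Bool.false_eq_true, if_false]
        rfl
      | true =>
        have hstep : pvStepB column [] (x, t) = [x] := by
          simp only [pvStepB, hu, Bool.not_true, Bool.false_eq_true, if_false]
          try rfl
        rw [hstep,
          List.isEmpty_eq_false_iff.mpr
            (pv_foldl_stepB_ne_nil column _ _ (List.cons_ne_nil _ _)),
          if_neg (by simp), pv_keyB column e tags _ hle']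
        simp only [pvTag, hu, if_true]
        rfl

theorem pv_zip_map_eq_range_map {β : Type} (f : List String → List (List String) → β) :
    ∀ (es : List (List String)) (cs : List (List (List String))), es.length ≤ cs.length →
      (es.zip cs).map (fun rc => f rc.1 rc.2)
        = (List.range es.length).map (fun i => f (es.getD i []) (cs.getD i [])) := by
  intro es
  induction es with
  | nil => intro cs _; simp
  | cons x es ih =>
    intro cs hcs
    cases cs with
    | nil => simp at hcs
    | cons c cs =>
      simp only [List.zip_cons_cons, List.map_cons, List.length_cons, List.range_succ_eq_map,
        List.map_map]
      rw [ih cs (by simpa using hcs)]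
      simp

-- ===== VERDICT (by name: the statement is the Claim_ definition above) =====
theorem add_pos_corpus_spec : Claim_equal_add_pos_corpus := by
  intro escaped corpus column _ hpre
  unfold Spec_add_pos_corpus add_pos_corpus add_pos_corpus_alt
  obtain ⟨hlen, hrow⟩ := hpre
  have hA := pv_loopSet (α := List String) escaped []
      (fun _ i v => pvRowA (corpus.getD i []) column v) escaped.length le_rfl
  simp only at hA
  rw [hA, List.drop_length, List.append_nil]
  rw [pv_zip_map_eq_range_map (fun e c => pvRowB column (e.zip c)) escaped corpus hlen]
  apply List.map_congr_left
  intro i hi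
  rw [List.mem_range] at hi
  rw [pvRowA_spec, pvRowB_spec _ _ _ (hrow i hi).1]
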